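-- pv_equiv track=rewrite | github.com/silentwave-alpha/Alpha_extractor | next/edge_miner.py | _generate_feature_combinations
-- ===== SOURCE A (Python) =====
-- def _generate_feature_combinations(feature_pool, max_kombinasi, is_regime_mode=False):
--     from itertools import combinations
--     combinations_list = [[f] for f in feature_pool]
--     actual_max = min(2 if is_regime_mode else max_kombinasi, len(feature_pool))
--     for combo_size in range(2, actual_max + 1):
--         for combo in combinations(feature_pool, combo_size):
--             combinations_list.append(list(combo))
--     return combinations_list
-- ===== SOURCE B (Python) =====
-- def _generate_feature_combinations(feature_pool, max_kombinasi, is_regime_mode=False):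
--     # Incremental table-building: each size is derived from the previous size's
--     # combos, each combo paired with the index of its last element.
--     pool = list(feature_pool)
--     n = len(pool)
--     result = [[f] for f in pool]
--     prev = [([pool[i]], i) for i in range(n)]
--     actual_max = min(2 if is_regime_mode else max_kombinasi, n)
--     size = 2
--     while size <= actual_max:
--         cur = []
--         for c, last in prev:
--             for j in range(last + 1, n):
--                 cur.append((c + [pool[j]], j))
--         result.extend(c for c, _ in cur)
--         prev = cur
--         size += 1
--     return result
-- ===== Notes on version B (the rewrite author's own statement) =====
-- stated objective: alternative
-- what changed: Replaces the per-size itertools.combinations library calls with an incremental build: each size's combos are derived by extending the previous size's combos (each kept with the index of its last element), reusing earlier work instead of re-enumerating from scratch.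
import Mathlib
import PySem

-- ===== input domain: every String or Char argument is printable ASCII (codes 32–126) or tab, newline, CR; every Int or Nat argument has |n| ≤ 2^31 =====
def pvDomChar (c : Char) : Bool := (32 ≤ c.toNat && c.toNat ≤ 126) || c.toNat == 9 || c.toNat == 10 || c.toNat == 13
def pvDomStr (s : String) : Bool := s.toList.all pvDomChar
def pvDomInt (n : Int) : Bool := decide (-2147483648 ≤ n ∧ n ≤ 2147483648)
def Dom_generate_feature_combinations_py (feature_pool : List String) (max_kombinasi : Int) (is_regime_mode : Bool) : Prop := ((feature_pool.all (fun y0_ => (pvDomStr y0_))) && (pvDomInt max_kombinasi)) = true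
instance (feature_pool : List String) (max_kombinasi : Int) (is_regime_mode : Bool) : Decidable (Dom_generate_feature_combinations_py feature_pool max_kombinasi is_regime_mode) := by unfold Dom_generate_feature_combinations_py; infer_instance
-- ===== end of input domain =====

-- B replaces the per-size itertools.combinations calls by an incremental build that
-- extends each previous-size combo (paired with the index of its last element); objective: alternative.

-- ===== PORT A =====
-- itertools.combinations(xs, k) in Python's positional lexicographic order
def combosA : Nat → List String → List (List String)
  | 0, _ => [[]]
  | _ + 1, [] => []
  | k + 1, x :: xs => (combosA k xs).map (fun c => x :: c) ++ combosA (k + 1) xs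

def generate_feature_combinations_py (feature_pool : List String) (max_kombinasi : Int) (is_regime_mode : Bool) : List (List String) :=
  let combinations_list := feature_pool.map (fun f => [f])
  let actual_max : Int := min (if is_regime_mode then 2 else max_kombinasi) (feature_pool.length : Int)
  (PySem.List.pyRange 2 (actual_max + 1) 1).foldl
    (fun acc combo_size =>
      (combosA combo_size.toNat feature_pool).foldl (fun a combo => a ++ [combo]) acc)
    combinations_list

-- ===== PORT B =====
-- the inner 'for j in range(last + 1, n)' loop appending to cur
def bInnerI (pool : List String) (c : List String) (last : Int) (cur : List (List String × Int)) : List (List String × Int) :=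
  (PySem.List.pyRange (last + 1) (pool.length : Int) 1).foldl
    (fun cur2 j => cur2 ++ [(c ++ [PySem.List.pyGetD pool j ""], j)]) cur

-- one pass of the 'for c, last in prev' loop building cur
def bStepI (pool : List String) (prev : List (List String × Int)) : List (List String × Int) :=
  prev.foldl (fun cur p => bInnerI pool p.1 p.2 cur) []

-- the 'while size <= actual_max' loop, fuel = number of remaining iterations
def bLoopI (pool : List String) : Nat → List (List String × Int) → List (List String) → List (List String)
  | 0, _, result => result
  | n + 1, prev, result =>
      let cur := bStepI pool prev
      bLoopI pool n cur (result ++ cur.map Prod.fst)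

def generate_feature_combinations_py_alt (feature_pool : List String) (max_kombinasi : Int) (is_regime_mode : Bool) : List (List String) :=
  let pool := feature_pool
  let n : Int := (pool.length : Int)
  let result := pool.map (fun f => [f])
  let prev := (PySem.List.pyRange 0 n 1).map (fun i => ([PySem.List.pyGetD pool i ""], i))
  let actual_max : Int := min (if is_regime_mode then 2 else max_kombinasi) n
  bLoopI pool (actual_max - 1).toNat prev result

-- ===== PRECONDITION & SPEC =====
def Spec_generate_feature_combinations_py (feature_pool : List String) (max_kombinasi : Int) (is_regime_mode : Bool) (out : List (List String)) : Prop := out = generate_feature_combinations_py_alt feature_pool max_kombinasi is_regime_mode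
instance (feature_pool : List String) (max_kombinasi : Int) (is_regime_mode : Bool) (out : List (List String)) : Decidable (Spec_generate_feature_combinations_py feature_pool max_kombinasi is_regime_mode out) := by unfold Spec_generate_feature_combinations_py; infer_instance

-- ===== CLAIM (what is proved, stated in full; the proofs are below) =====
def Claim_equal_generate_feature_combinations_py : Prop := ∀ (feature_pool : List String) (max_kombinasi : Int) (is_regime_mode : Bool), Dom_generate_feature_combinations_py feature_pool max_kombinasi is_regime_mode → Spec_generate_feature_combinations_py feature_pool max_kombinasi is_regime_mode (generate_feature_combinations_py feature_pool max_kombinasi is_regime_mode)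

-- ===== LEMMAS AND PROOFS =====

-- decompositions of a list: (element, suffix after it)
def decomps : List String → List (String × List String)
  | [] => []
  | x :: xs => (x, xs) :: decomps xs

-- the abstract combos-with-suffix table that B's loop simulates
def W (xs : List String) : Nat → List (List String × List String)
  | 0 => [([], xs)]
  | k + 1 => (W xs k).flatMap (fun p => (decomps p.2).map (fun q => (p.1 ++ [q.1], q.2)))

-- a suffix-table entry as B's port represents it: (combo, index of its last element)
def phi (pool : List String) (p : List String × List String) : List String × Int :=
  (p.1, ((pool.length - p.2.length - 1 : Nat) : Int))

lemma flatten_map_single {α β : Type} (f : α → β) : ∀ l : List α,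
    (l.map (fun x => [f x])).flatten = l.map f := by
  intro l
  induction l with
  | nil => rfl
  | cons x l ih => simp [ih]

lemma foldl_append_map {α β : Type} (f : α → β) : ∀ (l : List α) (acc : List β),
    l.foldl (fun a x => a ++ [f x]) acc = acc ++ l.map f := by
  intro l
  induction l with
  | nil => intro acc; simp
  | cons x l ih => intro acc; simp [List.foldl, ih]

lemma W_succ (k : Nat) : ∀ xs : List String,
    W xs (k + 1) = (decomps xs).flatMap (fun p => (W p.2 k).map (fun q => (p.1 :: q.1, q.2))) := by
  induction k with
  | zero => intro xs; simp [W, List.flatMap, flatten_map_single]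
  | succ k ih =>
      intro xs
      have h1 : W xs (k + 1 + 1)
          = (W xs (k + 1)).flatMap (fun p => (decomps p.2).map (fun q => (p.1 ++ [q.1], q.2))) := rfl
      rw [h1, ih xs, List.flatMap_assoc]
      congr 1
      funext x
      have h2 : W x.2 (k + 1)
          = (W x.2 k).flatMap (fun p => (decomps p.2).map (fun q => (p.1 ++ [q.1], q.2))) := rfl
      rw [h2]
      simp [List.flatMap_map, List.map_flatMap, List.map_map, Function.comp_def, List.cons_append]

-- front recursion of combosA
lemma combosA_succ (k : Nat) : ∀ xs : List String,
    combosA (k + 1) xs = (decomps xs).flatMap (fun p => (combosA k p.2).map (fun c => p.1 :: c)) := by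
  intro xs
  induction xs with
  | nil => simp [combosA, decomps]
  | cons x xs ih => simp [combosA, decomps, ih]

lemma W_fst (k : Nat) : ∀ xs : List String, (W xs k).map Prod.fst = combosA k xs := by
  induction k with
  | zero => intro xs; simp [W, combosA]
  | succ k ih =>
      intro xs
      rw [W_succ, combosA_succ, List.map_flatMap]
      congr 1
      funext p
      rw [← ih p.2]
      simp [List.map_map, Function.comp_def]

-- every entry of W (for k ≥ 1) carries a proper suffix of the pool
lemma decomps_wf (pool : List String) : ∀ (ys : List String) (m : Nat), ys = pool.drop m →
    ∀ q ∈ decomps ys, q.2 = pool.drop (pool.length - q.2.length) ∧ q.2.length < pool.length := by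
  intro ys
  induction ys with
  | nil => intro m _ q hq; simp [decomps] at hq
  | cons x ys ih =>
      intro m hm q hq
      have hmn : m < pool.length := by
        by_contra h
        have : pool.drop m = [] := List.drop_eq_nil_of_le (by omega)
        rw [this] at hm
        exact List.cons_ne_nil x ys hm
      have hys : ys = pool.drop (m + 1) := by
        have := congrArg (List.drop 1) hm
        simpa [List.drop_drop, Nat.add_comm] using this
      have hlen : ys.length = pool.length - (m + 1) := by
        rw [hys, List.length_drop]
      rcases (by simpa [decomps] using hq : q = (x, ys) ∨ q ∈ decomps ys) with h | h
      · subst h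
        refine ⟨?_, ?_⟩
        · show ys = pool.drop (pool.length - ys.length)
          rw [hlen]
          have h' : pool.length - (pool.length - (m + 1)) = m + 1 := by omega
          rw [h']
          exact hys
        · show ys.length < pool.length
          omega
      · exact ih (m + 1) hys q h

lemma W_suffix (pool : List String) : ∀ (k : Nat), ∀ r ∈ W pool k,
    r.2 = pool.drop (pool.length - r.2.length) := by
  intro k
  induction k with
  | zero =>
      intro r hr
      have : r = ([], pool) := by simpa [W] using hr
      subst this
      simp
  | succ k ih =>
      intro r hr
      have hr' : r ∈ (W pool k).flatMap (fun s => (decomps s.2).map (fun q => (s.1 ++ [q.1], q.2))) := hr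
      rcases List.mem_flatMap.mp hr' with ⟨s, hs, hpq⟩
      rcases List.mem_map.mp hpq with ⟨q, hq, rfl⟩
      exact (decomps_wf pool s.2 (pool.length - s.2.length) (ih s hs) q hq).1

lemma W_wf (pool : List String) : ∀ (k : Nat), ∀ p ∈ W pool (k + 1),
    p.2 = pool.drop (pool.length - p.2.length) ∧ p.2.length < pool.length := by
  intro k p hp
  have hp' : p ∈ (W pool k).flatMap (fun s => (decomps s.2).map (fun q => (s.1 ++ [q.1], q.2))) := hp
  rcases List.mem_flatMap.mp hp' with ⟨s, hs, hpq⟩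
  rcases List.mem_map.mp hpq with ⟨q, hq, rfl⟩
  exact decomps_wf pool s.2 (pool.length - s.2.length) (W_suffix pool k s hs) q hq

-- the index-typed inner loop enumerates exactly the decompositions of the suffix
lemma inner_sim (pool : List String) (c : List String) : ∀ (rest : List String) (m : Nat),
    rest = pool.drop m →
    (PySem.List.pyRange (m : Int) (pool.length : Int) 1).map
        (fun j => (c ++ [PySem.List.pyGetD pool j ""], j))
      = (decomps rest).map (fun q => (c ++ [q.1], ((pool.length - q.2.length - 1 : Nat) : Int))) := by
  intro rest
  induction rest with
  | nil =>
      intro m hm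
      have hle : pool.length ≤ m := by
        by_contra h
        have : pool.drop m ≠ [] := by
          simp [List.drop_eq_nil_iff]
          omega
        exact this hm.symm
      rw [PySem.List.pyRange_one_eq_nil (by exact_mod_cast hle)]
      simp [decomps]
  | cons x rest ih =>
      intro m hm
      have hmn : m < pool.length := by
        by_contra h
        have : pool.drop m = [] := List.drop_eq_nil_of_le (by omega)
        rw [this] at hm
        exact List.cons_ne_nil x rest hm
      have hrest : rest = pool.drop (m + 1) := by
        have := congrArg (List.drop 1) hm
        simpa [List.drop_drop, Nat.add_comm] using this
      have hlen : rest.length = pool.length - (m + 1) := by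
        rw [hrest, List.length_drop]
      have hx : PySem.List.pyGetD pool (m : Int) "" = x := by
        rw [PySem.List.pyGetD_natCast]
        have h0 : pool[m]? = some x := by
          have := congrArg (fun l : List String => l[0]?) hm
          simpa [List.getElem?_drop] using this.symm
        simp [List.getD, h0]
      rw [PySem.List.pyRange_one_cons (by exact_mod_cast hmn), List.map_cons]
      have hcast : ((m : Int) + 1) = ((m + 1 : Nat) : Int) := by push_cast; ring
      rw [hcast, ih (m + 1) hrest]
      simp only [decomps, List.map_cons, hx]
      congr 2
      omega

-- bStepI written as a flatMap
lemma bStepI_eq (pool : List String) (prev : List (List String × Int)) :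
    bStepI pool prev = prev.flatMap (fun p =>
      (PySem.List.pyRange (p.2 + 1) (pool.length : Int) 1).map
        (fun j => (p.1 ++ [PySem.List.pyGetD pool j ""], j))) := by
  unfold bStepI
  have h : ∀ (l : List (List String × Int)) (acc : List (List String × Int)),
      l.foldl (fun cur p => bInnerI pool p.1 p.2 cur) acc =
        acc ++ l.flatMap (fun p =>
          (PySem.List.pyRange (p.2 + 1) (pool.length : Int) 1).map
            (fun j => (p.1 ++ [PySem.List.pyGetD pool j ""], j))) := by
    intro l
    induction l with
    | nil => intro acc; simp
    | cons p l ih =>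
        intro acc
        rw [List.foldl_cons, ih]
        unfold bInnerI
        rw [foldl_append_map, List.flatMap_cons, List.append_assoc]
  simpa using h prev []

-- one loop pass of B's port advances the simulated suffix table by one size
lemma step_sim (pool : List String) (prev : List (List String × List String))
    (hwf : ∀ p ∈ prev, p.2 = pool.drop (pool.length - p.2.length) ∧ p.2.length < pool.length) :
    bStepI pool (prev.map (phi pool)) =
      (prev.flatMap (fun p => (decomps p.2).map (fun q => (p.1 ++ [q.1], q.2)))).map (phi pool) := by
  rw [bStepI_eq, List.flatMap_map, List.map_flatMap]
  induction prev with
  | nil => simp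
  | cons p l ih =>
      rw [List.flatMap_cons, List.flatMap_cons, ih (fun r hr => hwf r (List.mem_cons_of_mem p hr))]
      congr 1
      rcases hwf p (List.mem_cons_self) with ⟨hsuf, hlt⟩
      have h1 : (phi pool p).1 = p.1 := rfl
      have h2 : (phi pool p).2 = ((pool.length - p.2.length - 1 : Nat) : Int) := rfl
      have hcast : ((pool.length - p.2.length - 1 : Nat) : Int) + 1
          = ((pool.length - p.2.length : Nat) : Int) := by omega
      rw [h1, h2, hcast, inner_sim pool p.1 p.2 (pool.length - p.2.length) hsuf]
      simp [phi, List.map_map, Function.comp_def]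

-- B's seed is the simulated size-1 table
lemma seed_sim (pool : List String) :
    (PySem.List.pyRange 0 (pool.length : Int) 1).map
        (fun i => ([PySem.List.pyGetD pool i ""], i))
      = (W pool 1).map (phi pool) := by
  have h := inner_sim pool [] pool 0 (by simp)
  simp only [List.nil_append, Nat.cast_zero] at h
  rw [h]
  simp [W, List.flatMap, List.map_map, Function.comp_def, phi]

-- B's while-loop, started on the simulated table of size k+1, emits sizes k+2, k+3, …
lemma bLoopI_eq (pool : List String) : ∀ (n k : Nat) (res : List (List String)),
    bLoopI pool n ((W pool (k + 1)).map (phi pool)) res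
      = res ++ (List.range n).flatMap (fun i => combosA (k + 1 + 1 + i) pool) := by
  intro n
  induction n with
  | zero => intro k res; simp [bLoopI]
  | succ n ih =>
      intro k res
      show bLoopI pool n (bStepI pool ((W pool (k + 1)).map (phi pool)))
          (res ++ (bStepI pool ((W pool (k + 1)).map (phi pool))).map Prod.fst) = _
      have hstep : bStepI pool ((W pool (k + 1)).map (phi pool)) = (W pool (k + 1 + 1)).map (phi pool) := by
        rw [step_sim pool (W pool (k + 1)) (W_wf pool k)]
        rfl
      have hfst : ((W pool (k + 1 + 1)).map (phi pool)).map Prod.fst = combosA (k + 1 + 1) pool := by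
        rw [← W_fst (k + 1 + 1) pool, List.map_map]
        rfl
      rw [hstep, hfst, ih (k + 1)]
      have hf : (List.range (n + 1)).flatMap (fun i => combosA (k + 1 + 1 + i) pool)
          = combosA (k + 1 + 1) pool ++ (List.range n).flatMap (fun i => combosA (k + 1 + 1 + 1 + i) pool) := by
        rw [List.range_succ_eq_map, List.flatMap_cons, List.flatMap_map]
        have hfun : (fun a : Nat => combosA (k + 1 + 1 + a.succ) pool)
            = fun i : Nat => combosA (k + 1 + 1 + 1 + i) pool := by
          funext i
          congr 1
          omega
        rw [hfun]
      rw [hf, List.append_assoc]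

-- A's outer foldl over the mapped range of sizes
lemma aFold_eq (pool : List String) : ∀ (m : Nat) (c : Int) (acc : List (List String)),
    ((List.range m).map (fun k : Nat => c + (k : Int))).foldl
      (fun acc combo_size => (combosA combo_size.toNat pool).foldl (fun a combo => a ++ [combo]) acc) acc
    = acc ++ (List.range m).flatMap (fun i : Nat => combosA (c + (i : Int)).toNat pool) := by
  intro m
  induction m with
  | zero => intro c acc; simp
  | succ m ih =>
      intro c acc
      rw [List.range_succ, List.map_append, List.foldl_append, ih c, List.flatMap_append]
      simp [List.flatMap, List.append_assoc]
      simpa using flatten_map_single (fun x => x) (combosA (c + (m : Int)).toNat pool)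

-- ===== VERDICT (by name: the statement is the Claim_ definition above) =====
theorem generate_feature_combinations_py_spec : Claim_equal_generate_feature_combinations_py := by
  intro feature_pool max_kombinasi is_regime_mode _
  unfold Spec_generate_feature_combinations_py
  unfold generate_feature_combinations_py generate_feature_combinations_py_alt
  simp only []
  set a : Int := min (if is_regime_mode then 2 else max_kombinasi) (feature_pool.length : Int) with ha
  rw [seed_sim, bLoopI_eq feature_pool _ 0]
  rw [PySem.List.pyRange_one]
  have hn : (a + 1 - 2).toNat = (a - 1).toNat := by omega
  rw [hn, aFold_eq feature_pool ((a - 1).toNat) 2]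
  have hfun : (fun i : Nat => combosA ((2 : Int) + (i : Int)).toNat feature_pool)
      = fun i : Nat => combosA (0 + 1 + 1 + i) feature_pool := by
    funext i
    congr 1
  rw [hfun]
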